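-- pv_equiv track=rewrite | github.com/kchevali/MathVantage | Code/Exam/selectQuestionsv2.py | getExamArray
-- ===== SOURCE A (Python) =====
-- maxQ = 200
--
-- fileSections = ["Basic_Concepts", "Functions", "Trigonometry",
--                 "Limits", "Derivatives", "Integrals", "Plane_Geometry", "Solid_Geometry", "Analytic_Geometry"]
--
-- lessons = [
--     [(1, 3), (4, 6), (7, 9)],
--     [(10, 12), (13, 15), (16, 19)],
--     [(20, 22), (23, 26)],
--     [(27, 29), (30, 31)],
--     [(32, 34), (35, 37)],
--     [(38, 40), (41, 42)],
--     [(43, 46), (47, 49), (50, 51)],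
--     [(52, 54), (55, 57), (58, 59)],
--     [(60, 63), (64, 66)]
-- ]
--
-- def getExamArray(startQ, count):
--     index = 1
--     q = 1
--     endQ = startQ + count
--     for bookIndex in range(len(fileSections)):
--         for examIndex in range(len(lessons[bookIndex])):
--
--             # do not change repeat! Will have to reset
--             for i in range(10):
--                 if q >= endQ:
--                     break
--
--                 if q >= startQ:
--                     yield (index, q % maxQ, bookIndex + 1, examIndex + 1)
--                     index += 1
--                 q += 1
-- ===== SOURCE B (Python) =====
-- maxQ = 200
--
-- # one (book, exam) label per lesson-group, flattened from the lessons structure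
-- pairs = [(1, 1), (1, 2), (1, 3),
--          (2, 1), (2, 2), (2, 3),
--          (3, 1), (3, 2),
--          (4, 1), (4, 2),
--          (5, 1), (5, 2),
--          (6, 1), (6, 2),
--          (7, 1), (7, 2), (7, 3),
--          (8, 1), (8, 2), (8, 3),
--          (9, 1), (9, 2)]
--
-- def getExamArray(startQ, count):
--     endQ = startQ + count
--     index = 1
--     for q in range(1, 221):
--         if q >= endQ:
--             break
--         if q >= startQ:
--             book, exam = pairs[(q - 1) // 10]
--             yield (index, q % maxQ, book, exam)
--             index += 1
-- ===== Notes on version B (the rewrite author's own statement) =====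
-- stated objective: simpler
-- what changed: Replaces A's triple-nested loop over books/exams/repeat-10 with a precomputed flat table of the 22 (book, exam) group labels and a single loop over q = 1..220 that breaks at endQ and looks the label up by (q-1)//10.
import Mathlib
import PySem

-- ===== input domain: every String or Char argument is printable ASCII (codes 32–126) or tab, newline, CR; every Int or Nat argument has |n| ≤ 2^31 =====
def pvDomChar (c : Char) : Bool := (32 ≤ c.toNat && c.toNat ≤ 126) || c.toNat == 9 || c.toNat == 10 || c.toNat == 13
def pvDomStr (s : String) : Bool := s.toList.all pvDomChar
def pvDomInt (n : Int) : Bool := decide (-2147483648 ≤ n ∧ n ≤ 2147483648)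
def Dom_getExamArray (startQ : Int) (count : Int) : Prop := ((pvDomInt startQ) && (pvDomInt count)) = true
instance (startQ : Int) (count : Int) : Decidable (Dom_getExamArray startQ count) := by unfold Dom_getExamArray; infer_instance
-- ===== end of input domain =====

-- B replaces A's triple-nested loop over books/exams with a precomputed table of the 22
-- (book, exam) group labels and a single flat loop over q = 1..220 (objective: simpler).

-- ===== PORT A =====
def pvMaxQ : Int := 200

def pvFileSections : List String :=
  ["Basic_Concepts", "Functions", "Trigonometry",
   "Limits", "Derivatives", "Integrals", "Plane_Geometry", "Solid_Geometry", "Analytic_Geometry"]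

def pvLessons : List (List (Int × Int)) :=
  [[(1, 3), (4, 6), (7, 9)],
   [(10, 12), (13, 15), (16, 19)],
   [(20, 22), (23, 26)],
   [(27, 29), (30, 31)],
   [(32, 34), (35, 37)],
   [(38, 40), (41, 42)],
   [(43, 46), (47, 49), (50, 51)],
   [(52, 54), (55, 57), (58, 59)],
   [(60, 63), (64, 66)]]

-- the 'for i in range(10)' loop with its break; state is (yielded list, index, q)
def pvInnerA (startQ endQ : Int) (bookIndex examIndex : Nat) :
    Nat → List (Int × Int × Int × Int) × Int × Int → List (Int × Int × Int × Int) × Int × Int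
  | 0, st => st
  | n + 1, (out, index, q) =>
    if endQ ≤ q then (out, index, q)
    else if startQ ≤ q then
      pvInnerA startQ endQ bookIndex examIndex n
        (out ++ [(index, PySem.Int.mod q pvMaxQ, (bookIndex : Int) + 1, (examIndex : Int) + 1)],
         index + 1, q + 1)
    else pvInnerA startQ endQ bookIndex examIndex n (out, index, q + 1)

def getExamArray (startQ : Int) (count : Int) : List (Int × Int × Int × Int) :=
  let endQ := startQ + count
  ((List.range pvFileSections.length).foldl (fun st bookIndex =>
      (List.range (pvLessons[bookIndex]!.length)).foldl (fun st examIndex =>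
        pvInnerA startQ endQ bookIndex examIndex 10 st) st)
    ([], 1, 1)).1

-- ===== PORT B =====
-- one (book, exam) label per lesson-group, flattened from the lessons structure
def pvPairs : List (Int × Int) :=
  [(1, 1), (1, 2), (1, 3),
   (2, 1), (2, 2), (2, 3),
   (3, 1), (3, 2),
   (4, 1), (4, 2),
   (5, 1), (5, 2),
   (6, 1), (6, 2),
   (7, 1), (7, 2), (7, 3),
   (8, 1), (8, 2), (8, 3),
   (9, 1), (9, 2)]

-- the 'for q in range(1, 221)' loop with its break; pairs[(q-1)//10] is always in range
-- for q ∈ [1, 220], so the .getD default is never used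
def pvLoopB (startQ endQ : Int) :
    List Int → List (Int × Int × Int × Int) → Int → List (Int × Int × Int × Int)
  | [], out, _ => out
  | q :: rest, out, index =>
    if endQ ≤ q then out
    else if startQ ≤ q then
      let p := (PySem.List.pyGet? pvPairs (PySem.Int.floordiv (q - 1) 10)).getD (0, 0)
      pvLoopB startQ endQ rest (out ++ [(index, PySem.Int.mod q pvMaxQ, p.1, p.2)]) (index + 1)
    else pvLoopB startQ endQ rest out index

def getExamArray_alt (startQ : Int) (count : Int) : List (Int × Int × Int × Int) :=
  pvLoopB startQ (startQ + count) (PySem.List.pyRange 1 221 1) [] 1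

-- ===== PRECONDITION & SPEC =====
def Spec_getExamArray (startQ : Int) (count : Int) (out : List (Int × Int × Int × Int)) : Prop := out = getExamArray_alt startQ count
instance (startQ : Int) (count : Int) (out : List (Int × Int × Int × Int)) : Decidable (Spec_getExamArray startQ count out) := by unfold Spec_getExamArray; infer_instance

-- ===== CLAIM (what is proved, stated in full; the proofs are below) =====
def Claim_equal_getExamArray : Prop := ∀ (startQ : Int) (count : Int), Dom_getExamArray startQ count → Spec_getExamArray startQ count (getExamArray startQ count)

-- ===== LEMMAS AND PROOFS =====

-- the (bookIndex, examIndex) pairs A's two outer loops run through, flattened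
def pvGroups : List (Nat × Nat) :=
  [(0,0),(0,1),(0,2),(1,0),(1,1),(1,2),(2,0),(2,1),(3,0),(3,1),(4,0),(4,1),
   (5,0),(5,1),(6,0),(6,1),(6,2),(7,0),(7,1),(7,2),(8,0),(8,1)]

-- A's two outer loops as one fold over the flattened group list
def pvGenFold (startQ endQ : Int) :
    List (Nat × Nat) → List (Int × Int × Int × Int) × Int × Int → List (Int × Int × Int × Int) × Int × Int
  | [], st => st
  | (b, e) :: ps, st => pvGenFold startQ endQ ps (pvInnerA startQ endQ b e 10 st)

lemma bridgeA (s c : Int) : getExamArray s c = (pvGenFold s (s + c) pvGroups ([], 1, 1)).1 := by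
  unfold getExamArray
  norm_num [pvFileSections, pvLessons, List.range_succ]
  simp only [pvGroups, pvGenFold]

lemma innerA_frozen (s e' : Int) (b ex : Nat) :
    ∀ n (st : List (Int × Int × Int × Int) × Int × Int), e' ≤ st.2.2 →
      pvInnerA s e' b ex n st = st := by
  intro n st h
  cases n with
  | zero => rfl
  | succ n =>
    obtain ⟨out, index, q⟩ := st
    simp only [pvInnerA]
    rw [if_pos h]

lemma genFold_frozen (s e' : Int) :
    ∀ (ps : List (Nat × Nat)) (st : List (Int × Int × Int × Int) × Int × Int), e' ≤ st.2.2 →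
      pvGenFold s e' ps st = st := by
  intro ps
  induction ps with
  | nil => intro st h; rfl
  | cons p ps ih =>
    intro st h
    obtain ⟨b, ex⟩ := p
    simp only [pvGenFold]
    rw [innerA_frozen s e' b ex 10 st h]
    exact ih st h

lemma floordiv_shift (g k : Int) (h0 : 0 ≤ k) (h10 : k < 10) :
    PySem.Int.floordiv (10 * g + k) 10 = g := by
  rw [PySem.Int.floordiv_eq_iff_of_pos (by norm_num)]
  omega

lemma pairs_lookup : ∀ g : Nat, g < 22 →
    PySem.List.pyGet? pvPairs (g : Int) =
      some (((pvGroups.getD g (0, 0)).1 : Int) + 1, ((pvGroups.getD g (0, 0)).2 : Int) + 1) := by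
  decide

lemma loopB_frozen (s e' : Int) (q : Int) (out : List (Int × Int × Int × Int)) (index : Int)
    (h : e' ≤ q) : pvLoopB s e' (PySem.List.pyRange q 221 1) out index = out := by
  by_cases h221 : q < 221
  · rw [PySem.List.pyRange_one_cons h221]
    simp only [pvLoopB]
    rw [if_pos h]
  · rw [PySem.List.pyRange_one_eq_nil (by omega)]
    rfl

lemma inner_loop (s e' : Int) (g b ex : Nat)
    (hp : PySem.List.pyGet? pvPairs (g : Int) = some ((b : Int) + 1, (ex : Int) + 1))
    (hg : (g : Int) ≤ 21) :
    ∀ (n : Nat) (q : Int) (out : List (Int × Int × Int × Int)) (index : Int),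
      10 * (g : Int) + 1 ≤ q → q + (n : Int) = 10 * (g : Int) + 11 →
      pvLoopB s e' (PySem.List.pyRange q 221 1) out index
        = pvLoopB s e' (PySem.List.pyRange (pvInnerA s e' b ex n (out, index, q)).2.2 221 1)
            (pvInnerA s e' b ex n (out, index, q)).1 (pvInnerA s e' b ex n (out, index, q)).2.1
      ∧ ((pvInnerA s e' b ex n (out, index, q)).2.2 = 10 * (g : Int) + 11
         ∨ e' ≤ (pvInnerA s e' b ex n (out, index, q)).2.2) := by
  intro n
  induction n with
  | zero =>
    intro q out index hq1 hqn
    push_cast at hqn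
    refine ⟨rfl, Or.inl ?_⟩
    show q = 10 * (g : Int) + 11
    omega
  | succ n ih =>
    intro q out index hq1 hqn
    push_cast at hqn
    have hq221 : q < 221 := by omega
    by_cases he : e' ≤ q
    · constructor
      · rw [loopB_frozen s e' q out index he]
        simp only [pvInnerA]
        rw [if_pos he]
        rw [loopB_frozen s e' q out index he]
      · simp only [pvInnerA]
        rw [if_pos he]
        exact Or.inr he
    · have hfd : PySem.Int.floordiv (q - 1) 10 = (g : Int) := by
        have h := floordiv_shift (g : Int) (q - 1 - 10 * (g : Int)) (by omega) (by omega)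
        rw [show 10 * (g : Int) + (q - 1 - 10 * (g : Int)) = q - 1 by ring] at h
        exact h
      by_cases hs : s ≤ q
      · have hstep : pvInnerA s e' b ex (n + 1) (out, index, q)
            = pvInnerA s e' b ex n
                (out ++ [(index, PySem.Int.mod q pvMaxQ, (b : Int) + 1, (ex : Int) + 1)],
                 index + 1, q + 1) := by
          simp only [pvInnerA]
          rw [if_neg he, if_pos hs]
        rw [hstep]
        have hB : pvLoopB s e' (PySem.List.pyRange q 221 1) out index
            = pvLoopB s e' (PySem.List.pyRange (q + 1) 221 1)
                (out ++ [(index, PySem.Int.mod q pvMaxQ, (b : Int) + 1, (ex : Int) + 1)])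
                (index + 1) := by
          rw [PySem.List.pyRange_one_cons hq221]
          simp only [pvLoopB]
          rw [if_neg he, if_pos hs, hfd, hp]
          simp only [Option.getD_some]
        rw [hB]
        exact ih (q + 1)
          (out ++ [(index, PySem.Int.mod q pvMaxQ, (b : Int) + 1, (ex : Int) + 1)])
          (index + 1) (by omega) (by omega)
      · have hstep : pvInnerA s e' b ex (n + 1) (out, index, q)
            = pvInnerA s e' b ex n (out, index, q + 1) := by
          simp only [pvInnerA]
          rw [if_neg he, if_neg hs]
        rw [hstep]
        have hB : pvLoopB s e' (PySem.List.pyRange q 221 1) out index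
            = pvLoopB s e' (PySem.List.pyRange (q + 1) 221 1) out index := by
          rw [PySem.List.pyRange_one_cons hq221]
          simp only [pvLoopB]
          rw [if_neg he, if_neg hs]
        rw [hB]
        exact ih (q + 1) out index (by omega) (by omega)

lemma pvGroups_length : pvGroups.length = 22 := rfl

lemma top_loop (s e' : Int) :
    ∀ n (g : Nat) (out : List (Int × Int × Int × Int)) (index : Int), g + n = 22 →
      (pvGenFold s e' (pvGroups.drop g) (out, index, 10 * (g : Int) + 1)).1
        = pvLoopB s e' (PySem.List.pyRange (10 * (g : Int) + 1) 221 1) out index := by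
  intro n
  induction n with
  | zero =>
    intro g out index hg
    have hg22 : g = 22 := by omega
    subst hg22
    rw [show pvGroups.drop 22 = [] from rfl]
    rw [PySem.List.pyRange_one_eq_nil (by omega)]
    rfl
  | succ n ih =>
    intro g out index hg
    have hlen : g < pvGroups.length := by rw [pvGroups_length]; omega
    have hdrop : pvGroups.drop g = pvGroups.getD g (0, 0) :: pvGroups.drop (g + 1) := by
      rw [List.drop_eq_getElem_cons hlen, List.getD_eq_getElem pvGroups (0, 0) hlen]
    rw [hdrop]
    obtain ⟨hB, hdisj⟩ := inner_loop s e' g (pvGroups.getD g (0, 0)).1 (pvGroups.getD g (0, 0)).2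
      (pairs_lookup g (by omega)) (by omega)
      10 (10 * (g : Int) + 1) out index (by omega) (by push_cast; omega)
    set st := pvInnerA s e' (pvGroups.getD g (0, 0)).1 (pvGroups.getD g (0, 0)).2 10
      (out, index, 10 * (g : Int) + 1) with hst
    have hfold : pvGenFold s e' (pvGroups.getD g (0, 0) :: pvGroups.drop (g + 1))
        (out, index, 10 * (g : Int) + 1) = pvGenFold s e' (pvGroups.drop (g + 1)) st := by
      rw [hst]
      simp only [pvGenFold]
    rw [hfold, hB]
    rcases hdisj with hq | hbr
    · have := ih (g + 1) st.1 st.2.1 (by omega)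
      rw [show (10 * ((g + 1 : Nat) : Int) + 1) = 10 * (g : Int) + 11 by push_cast; ring] at this
      rw [← hq] at this
      rw [show (st.1, st.2.1, st.2.2) = st from rfl] at this
      exact this
    · rw [genFold_frozen s e' (pvGroups.drop (g + 1)) st hbr]
      rw [loopB_frozen s e' st.2.2 st.1 st.2.1 hbr]

-- ===== VERDICT (by name: the statement is the Claim_ definition above) =====
theorem getExamArray_spec : Claim_equal_getExamArray := by
  intro s c _
  unfold Spec_getExamArray getExamArray_alt
  rw [bridgeA]
  have := top_loop s (s + c) 22 0 [] 1 rfl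
  simpa using this
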